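-- pv_equiv track=rewrite | github.com/wendyluv/Toolkit | app_logic.py | is_function
-- ===== SOURCE A (Python) =====
-- def is_function(relation_set):
-- 	hashed = {}
-- 	for elem in relation_set:
-- 		if(hashed.get(elem[0], False)):
-- 			return False
-- 		else:
-- 			hashed[elem[0]] = True
-- 	return True
-- ===== SOURCE B (Python) =====
-- def is_function(relation_set):
-- 	firsts = [e[0] for e in relation_set]
-- 	return len(firsts) == len(set(firsts))
-- ===== Notes on version B (the rewrite author's own statement) =====
-- stated objective: simpler
-- what changed: Replaces the incremental dict-probe loop with early return by building the list of first elements once and comparing its length with its set's cardinality.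
import Mathlib
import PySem

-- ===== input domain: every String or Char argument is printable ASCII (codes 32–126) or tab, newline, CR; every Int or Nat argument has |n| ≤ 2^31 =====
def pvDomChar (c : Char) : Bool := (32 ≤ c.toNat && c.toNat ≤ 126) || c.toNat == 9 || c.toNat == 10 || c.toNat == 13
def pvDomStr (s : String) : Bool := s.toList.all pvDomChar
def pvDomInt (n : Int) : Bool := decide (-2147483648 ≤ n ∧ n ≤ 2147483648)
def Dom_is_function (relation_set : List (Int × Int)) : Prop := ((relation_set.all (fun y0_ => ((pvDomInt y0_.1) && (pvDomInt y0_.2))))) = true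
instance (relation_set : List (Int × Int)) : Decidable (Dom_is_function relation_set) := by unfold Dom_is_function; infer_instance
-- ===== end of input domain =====

-- B drops A's incremental dict-probe/early-return loop: it builds the list of first
-- components once and compares its length with its set's cardinality (objective: simpler).

-- ===== PORT A =====
-- the for-loop with its early 'return False': structural recursion over the list,
-- carrying the dict 'hashed'
def is_function_go (hashed : PySem.Dict Int Bool) : List (Int × Int) → Bool
  | [] => true
  | elem :: rest =>
    if hashed.getD elem.1 false then false
    else is_function_go (hashed.insert elem.1 true) rest

def is_function (relation_set : List (Int × Int)) : Bool :=
  is_function_go PySem.Dict.empty relation_set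

-- ===== PORT B =====
def is_function_alt (relation_set : List (Int × Int)) : Bool :=
  let firsts := relation_set.map (fun e => e.1)
  decide (PySem.List.len firsts = PySem.Set.len (PySem.Set.ofList firsts))

-- ===== PRECONDITION & SPEC =====
def Spec_is_function (relation_set : List (Int × Int)) (out : Bool) : Prop := out = is_function_alt relation_set
instance (relation_set : List (Int × Int)) (out : Bool) : Decidable (Spec_is_function relation_set out) := by unfold Spec_is_function; infer_instance

-- ===== CLAIM (what is proved, stated in full; the proofs are below) =====
def Claim_equal_is_function : Prop := ∀ (relation_set : List (Int × Int)), Dom_is_function relation_set → Spec_is_function relation_set (is_function relation_set)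

-- ===== LEMMAS AND PROOFS =====

-- A's loop, with the dict's key set abstracted as the list s of already-seen firsts
theorem is_function_go_spec (l : List (Int × Int)) (s : List Int)
    (d : PySem.Dict Int Bool) (hd : ∀ k, d.getD k false = decide (k ∈ s)) :
    is_function_go d l =
      decide ((l.map (fun e => e.1)).Nodup ∧ ∀ x ∈ l, x.1 ∉ s) := by
  induction l generalizing s d with
  | nil => simp [is_function_go]
  | cons e rest ih =>
    rw [is_function_go, hd e.1]
    by_cases he : e.1 ∈ s
    · rw [if_pos (by simp [he])]
      symm
      rw [decide_eq_false_iff_not]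
      rintro ⟨-, hall⟩
      exact (hall e (.head _)) he
    · rw [if_neg (by simp [he])]
      rw [ih (e.1 :: s) _ (by
        intro k
        rw [PySem.Dict.getD_insert, hd k]
        by_cases hk : k = e.1 <;> simp [hk])]
      simp only [decide_eq_decide]
      constructor
      · rintro ⟨hn, hall⟩
        simp only [List.map_cons, List.nodup_cons, List.mem_map]
        refine ⟨⟨?_, hn⟩, ?_⟩
        · rintro ⟨x, hx, hxe⟩
          exact hall x hx (by rw [hxe]; exact .head _)
        · intro x hx
          rcases List.mem_cons.mp hx with rfl | hx'
          · exact he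
          · exact fun h => hall x hx' (.tail _ h)
      · rintro ⟨hnodup, hall⟩
        simp only [List.map_cons, List.nodup_cons, List.mem_map] at hnodup
        refine ⟨hnodup.2, fun x hx => ?_⟩
        simp only [List.mem_cons]
        rintro (h | h)
        · exact hnodup.1 ⟨x, hx, h⟩
        · exact hall x (.tail _ hx) h

-- set(xs) (first occurrences kept) is a sublist of xs
theorem ofList_sublist_aux {α : Type} [BEq α] [LawfulBEq α] (xs s : List α) :
    (xs.foldl PySem.Set.add s).Sublist (s ++ xs) := by
  induction xs generalizing s with
  | nil => simp
  | cons x xs ih =>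
    have h1 : (PySem.Set.add s x).Sublist (s ++ [x]) := by
      unfold PySem.Set.add
      split
      · exact (List.sublist_append_left s [x])
      · exact List.Sublist.refl _
    have h2 := ih (PySem.Set.add s x)
    have h3 : ((PySem.Set.add s x) ++ xs).Sublist (s ++ x :: xs) := by
      simpa using h1.append_right xs
    exact h2.trans h3

theorem len_ofList_eq_iff_nodup {α : Type} [BEq α] [LawfulBEq α] (xs : List α) :
    (PySem.Set.ofList xs).length = xs.length ↔ xs.Nodup := by
  constructor
  · intro h
    have hsub : (PySem.Set.ofList xs).Sublist xs := by
      have := ofList_sublist_aux xs ([] : List α)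
      simpa [PySem.Set.ofList_eq_foldl] using this
    have := hsub.eq_of_length h
    rw [← this]
    exact PySem.Set.nodup_ofList xs
  · intro h
    rw [PySem.Set.ofList_eq_self_of_nodup _ h]

-- ===== VERDICT (by name: the statement is the Claim_ definition above) =====
theorem is_function_spec : Claim_equal_is_function := by
  intro relation_set _
  unfold Spec_is_function is_function is_function_alt
  rw [is_function_go_spec relation_set [] PySem.Dict.empty (by intro k; simp [PySem.Dict.getD])]
  simp only [List.not_mem_nil, not_false_iff, implies_true, and_true,
    decide_eq_decide, PySem.List.len_eq, PySem.Set.len]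
  rw [← len_ofList_eq_iff_nodup (relation_set.map (fun e => e.1))]
  exact ⟨fun h => by exact_mod_cast h.symm, fun h => by exact_mod_cast h.symm⟩
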